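-- pv_equiv track=rewrite | github.com/sergiolibe/adventofcode2018 | day2-1.py | containsxletters
-- ===== SOURCE A (Python) =====
-- def containsxletters(palabra, n):
--     #mayor = 0
--     for letra in palabra:
--         ans = 0
--         for temp_letra in palabra:
--             # i += 1
--             if letra == temp_letra:
--                 ans += 1
--         #if ans > mayor:
--         #    mayor = ans
--         if ans == n:
--             return True
--     #return mayor
--     return False
-- ===== SOURCE B (Python) =====
-- def containsxletters(palabra, n):
--     counts = {}
--     for ch in palabra:
--         counts[ch] = counts.get(ch, 0) + 1
--     return n in counts.values()
-- ===== Notes on version B (the rewrite author's own statement) =====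
-- stated objective: faster
-- what changed: replaces the quadratic rescan (one full inner count pass per character) with a single pass that builds a character-count dictionary once, then checks whether n is among its values
import Mathlib
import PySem

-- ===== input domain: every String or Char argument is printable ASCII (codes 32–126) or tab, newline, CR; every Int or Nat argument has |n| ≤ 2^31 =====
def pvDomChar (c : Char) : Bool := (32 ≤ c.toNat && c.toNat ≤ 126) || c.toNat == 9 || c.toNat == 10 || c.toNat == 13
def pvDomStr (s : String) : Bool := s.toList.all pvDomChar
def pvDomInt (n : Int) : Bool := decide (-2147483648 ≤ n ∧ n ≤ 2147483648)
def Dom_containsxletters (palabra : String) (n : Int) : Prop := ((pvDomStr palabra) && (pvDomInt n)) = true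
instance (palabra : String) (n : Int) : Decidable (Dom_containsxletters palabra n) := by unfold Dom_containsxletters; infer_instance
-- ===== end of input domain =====

-- B replaces A's quadratic rescan with a one-pass character-count dictionary; same result, O(L) vs O(L^2).

-- ===== PORT A =====
-- outer loop with early return; inner loop is the counting fold over the whole string
def cxlLoopA (l : List Char) (rest : List Char) (n : Int) : Bool :=
  match rest with
  | [] => false
  | letra :: t =>
      let ans : Int := l.foldl (fun ans temp => if letra == temp then ans + 1 else ans) 0
      if ans = n then true else cxlLoopA l t n

def containsxletters (palabra : String) (n : Int) : Bool :=
  cxlLoopA palabra.toList palabra.toList n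

-- ===== PORT B =====
def containsxletters_alt (palabra : String) (n : Int) : Bool :=
  let counts : PySem.Dict Char Int :=
    palabra.toList.foldl (fun d ch => d.insert ch (d.getD ch 0 + 1)) PySem.Dict.empty
  counts.values.contains n

-- ===== PRECONDITION & SPEC =====
def Spec_containsxletters (palabra : String) (n : Int) (out : Bool) : Prop := out = containsxletters_alt palabra n
instance (palabra : String) (n : Int) (out : Bool) : Decidable (Spec_containsxletters palabra n out) := by unfold Spec_containsxletters; infer_instance

-- ===== CLAIM (what is proved, stated in full; the proofs are below) =====
def Claim_equal_containsxletters : Prop := ∀ (palabra : String) (n : Int), Dom_containsxletters palabra n → Spec_containsxletters palabra n (containsxletters palabra n)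

-- ===== LEMMAS AND PROOFS =====

-- A's inner loop counts occurrences
lemma cxl_inner_count (l : List Char) (c : Char) (a : Int) :
    l.foldl (fun ans temp => if c == temp then ans + 1 else ans) a = a + l.count c := by
  induction l generalizing a with
  | nil => simp
  | cons x t ih =>
      rw [List.foldl_cons, ih, List.count_cons]
      by_cases h : c = x
      · simp [h]; ring
      · simp [h, Ne.symm h]

lemma cxlLoopA_eq_decide (l rest : List Char) (n : Int) :
    cxlLoopA l rest n = decide (∃ c ∈ rest, (l.count c : Int) = n) := by
  induction rest with
  | nil => simp [cxlLoopA]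
  | cons c t ih =>
      simp only [cxlLoopA, cxl_inner_count, zero_add, ih]
      by_cases h : (l.count c : Int) = n <;> simp [h]

lemma alt_eq_decide (l : List Char) (n : Int) :
    (l.foldl (fun d ch => d.insert ch (d.getD ch 0 + 1)) (PySem.Dict.empty : PySem.Dict Char Int)).values.contains n
      = decide (∃ c ∈ l, (l.count c : Int) = n) := by
  rw [PySem.Dict.foldl_insert_getD_add_one_eq_counter]
  simp [PySem.Dict.values, PySem.Dict.items_counter, PySem.Set.mem_ofList, eq_comm]

-- ===== VERDICT (by name: the statement is the Claim_ definition above) =====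
theorem containsxletters_spec : Claim_equal_containsxletters := by
  intro palabra n _
  unfold Spec_containsxletters containsxletters containsxletters_alt
  rw [cxlLoopA_eq_decide, alt_eq_decide]
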